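-- pv_equiv track=rewrite | github.com/sueszli/vector-database-benchmark | dataset/python-mutated/_py_components_generation.py | fix_keywords
-- ===== SOURCE A (Python) =====
-- def fix_keywords(txt):
--     if False:
--         i = 10
--         return i + 15
--     '\n    replaces javascript keywords true, false, null with Python keywords\n    '
--     fix_word = {'true': 'True', 'false': 'False', 'null': 'None'}
--     for (js_keyword, python_keyword) in fix_word.items():
--         txt = txt.replace(js_keyword, python_keyword)
--     return txt
-- ===== SOURCE B (Python) =====
-- def fix_keywords(txt):
--     """replaces javascript keywords true, false, null with Python keywords
--     in one left-to-right scan instead of three full replace passes"""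
--     fix_word = {'true': 'True', 'false': 'False', 'null': 'None'}
--     out = []
--     i = 0
--     n = len(txt)
--     while i < n:
--         for js_keyword, python_keyword in fix_word.items():
--             if txt.startswith(js_keyword, i):
--                 out.append(python_keyword)
--                 i += len(js_keyword)
--                 break
--         else:
--             out.append(txt[i])
--             i += 1
--     return ''.join(out)
-- ===== Notes on version B (the rewrite author's own statement) =====
-- stated objective: alternative
-- what changed: Replaces A's three sequential full-string .replace passes with a single left-to-right scan that at each position tries the three keywords and emits the Python keyword or the character; equal because no replacement text contains a lowercase source keyword.
import Mathlib
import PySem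

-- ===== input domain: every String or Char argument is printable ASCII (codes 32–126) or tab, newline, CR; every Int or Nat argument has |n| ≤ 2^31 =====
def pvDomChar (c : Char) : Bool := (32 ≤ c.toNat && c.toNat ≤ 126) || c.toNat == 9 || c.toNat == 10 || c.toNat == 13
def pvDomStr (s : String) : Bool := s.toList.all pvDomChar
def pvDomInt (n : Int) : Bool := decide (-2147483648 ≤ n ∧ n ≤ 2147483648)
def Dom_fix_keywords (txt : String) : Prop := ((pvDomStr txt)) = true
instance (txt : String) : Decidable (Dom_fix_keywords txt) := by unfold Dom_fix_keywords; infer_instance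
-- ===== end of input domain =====

-- B replaces A's three sequential full-string .replace passes by ONE left-to-right scan
-- that tries the three keywords at each position ('alternative' objective); return values agree on all inputs.

-- ===== PORT A =====
-- the dict literal {'true': 'True', 'false': 'False', 'null': 'None'}
def fixWord_fix_keywords : PySem.Dict String String :=
  (((PySem.Dict.empty).insert "true" "True").insert "false" "False").insert "null" "None"

-- the for-loop over fix_word.items(): txt = txt.replace(js, py)
def fix_keywords (txt : String) : String :=
  (fixWord_fix_keywords.items).foldl (fun t p => PySem.Str.replace t p.1 p.2) txt

-- ===== PORT B =====
-- Source B's single while-loop scan: at each position try 'true','false','null' (dict order),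
-- emit the replacement and skip the keyword, else emit the character and advance one.
-- Ported by hand as structural recursion over the character list (exact on all inputs).
def fixScan : List Char → List Char
  | [] => []
  | c :: t =>
    if ['t','r','u','e'].isPrefixOf (c :: t) then
      ['T','r','u','e'] ++ fixScan ((c :: t).drop 4)
    else if ['f','a','l','s','e'].isPrefixOf (c :: t) then
      ['F','a','l','s','e'] ++ fixScan ((c :: t).drop 5)
    else if ['n','u','l','l'].isPrefixOf (c :: t) then
      ['N','o','n','e'] ++ fixScan ((c :: t).drop 4)
    else
      c :: fixScan t
  termination_by l => l.length
  decreasing_by all_goals (simp; try omega)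

def fix_keywords_alt (txt : String) : String := String.ofList (fixScan txt.toList)

-- ===== PRECONDITION & SPEC =====
def Spec_fix_keywords (txt : String) (out : String) : Prop := out = fix_keywords_alt txt
instance (txt : String) (out : String) : Decidable (Spec_fix_keywords txt out) := by unfold Spec_fix_keywords; infer_instance

-- ===== CLAIM (what is proved, stated in full; the proofs are below) =====
def Claim_equal_fix_keywords : Prop := ∀ (txt : String), Dom_fix_keywords txt → Spec_fix_keywords txt (fix_keywords txt)

-- ===== LEMMAS AND PROOFS =====

-- a clean structural version of one Python replace pass (old nonempty)
def subst (old new : List Char) : List Char → List Char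
  | [] => []
  | c :: t =>
    if old.isPrefixOf (c :: t) then
      new ++ subst old new ((c :: t).drop (max old.length 1))
    else
      c :: subst old new t
  termination_by l => l.length
  decreasing_by all_goals (simp; try omega)

lemma go_eq_subst (old new : List Char) (hold : old ≠ []) :
    ∀ (f : Nat) (l acc : List Char), l.length ≤ f →
      PySem.Chars.replace.go old new f l acc = acc.reverse ++ subst old new l := by
  intro f
  induction f with
  | zero =>
    intro l acc hl
    have : l = [] := List.eq_nil_of_length_eq_zero (Nat.le_zero.mp hl)
    subst this
    simp [PySem.Chars.replace.go, subst]
  | succ f ih =>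
    intro l acc hl
    cases l with
    | nil => simp [PySem.Chars.replace.go, subst]
    | cons c t =>
      by_cases hp : old.isPrefixOf (c :: t)
      · have hlen : 1 ≤ old.length := by
          cases old with
          | nil => exact absurd rfl hold
          | cons _ _ => simp
        have hmax : max old.length 1 = old.length := by omega
        have hdrop : ((c :: t).drop old.length).length ≤ f := by
          simp only [List.length_drop]
          simp at hl ⊢
          omega
        rw [show PySem.Chars.replace.go old new (f+1) (c :: t) acc
              = PySem.Chars.replace.go old new f ((c :: t).drop old.length) (new.reverse ++ acc) by
            simp [PySem.Chars.replace.go, hp]]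
        rw [ih _ _ hdrop]
        simp [subst, hp, hmax]
      · have hdrop : t.length ≤ f := by simp at hl; omega
        rw [show PySem.Chars.replace.go old new (f+1) (c :: t) acc
              = PySem.Chars.replace.go old new f t (c :: acc) by
            simp [PySem.Chars.replace.go, hp]]
        rw [ih _ _ hdrop]
        simp [subst, hp]

lemma replace_eq_subst (s old new : List Char) (hold : old ≠ []) :
    PySem.Chars.replace s old new = subst old new s := by
  unfold PySem.Chars.replace
  have : old.isEmpty = false := by cases old <;> simp_all
  rw [this]
  simpa using go_eq_subst old new hold s.length s [] le_rfl

-- a pass whose pattern's first char occurs nowhere in pre passes over pre unchanged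
lemma subst_passthrough (old new pre X : List Char) (hold : old ≠ [])
    (h : ∀ c ∈ pre, old.head? ≠ some c) :
    subst old new (pre ++ X) = pre ++ subst old new X := by
  induction pre with
  | nil => rfl
  | cons c pre' ih =>
    have hnp : ¬ (old.isPrefixOf (c :: (pre' ++ X)) = true) := by
      intro hp
      cases old with
      | nil => exact hold rfl
      | cons o ot =>
        simp [List.isPrefixOf] at hp
        exact (h c (by simp)) (by simp [hp.1])
    simp only [List.cons_append]
    rw [subst, if_neg hnp]
    rw [ih (fun d hd => h d (by simp [hd]))]

-- a prefix of the OUTPUT of a pass not containing new's first char was already a prefix of the input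
lemma prefix_subst_reflect (old new : List Char) (H : Char) (hnew : new.head? = some H) :
    ∀ (q X : List Char), H ∉ q → q <+: subst old new X → q <+: X := by
  intro q
  induction q with
  | nil => intro X _ _; simp
  | cons a q' ih =>
    intro X hH hq
    cases X with
    | nil => rw [subst] at hq; simp at hq
    | cons c t =>
      by_cases hp : old.isPrefixOf (c :: t) = true
      · rw [subst, if_pos hp] at hq
        cases new with
        | nil => simp at hnew
        | cons n nt =>
          simp at hnew
          rw [List.cons_append, List.cons_prefix_cons] at hq
          exact absurd (by simp [← hnew, hq.1] : H ∈ a :: q') hH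
      · rw [subst, if_neg hp] at hq
        rw [List.cons_prefix_cons] at hq ⊢
        exact ⟨hq.1, ih t (fun h => hH (by simp [h])) hq.2⟩

-- abbreviations for the three passes
def substT : List Char → List Char := subst ['t','r','u','e'] ['T','r','u','e']
def substF : List Char → List Char := subst ['f','a','l','s','e'] ['F','a','l','s','e']
def substN : List Char → List Char := subst ['n','u','l','l'] ['N','o','n','e']

lemma len_lt_of_append {p w : List Char} {c : Char} {t : List Char}
    (hp : p ≠ []) (hw : p ++ w = c :: t) : w.length < (c :: t).length := by
  have hl := congrArg List.length hw
  rw [List.length_append] at hl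
  have : 1 ≤ p.length := by cases p with | nil => exact absurd rfl hp | cons _ _ => simp
  omega

lemma composed_eq_fixScan : ∀ (s : List Char), substN (substF (substT s)) = fixScan s := by
  intro s
  induction hh : s.length using Nat.strong_induction_on generalizing s with
  | _ n ih =>
  subst hh
  cases s with
  | nil => simp only [substT, substF, substN]; rw [subst, subst, subst, fixScan]
  | cons c t =>
    by_cases h1 : (['t','r','u','e'] : List Char).isPrefixOf (c :: t)
    · -- s = "true" ++ w
      obtain ⟨w, hw⟩ := List.isPrefixOf_iff_prefix.mp h1
      have hT : substT (c :: t) = ['T','r','u','e'] ++ substT w := by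
        rw [← hw]; simp only [List.cons_append, List.nil_append]
        unfold substT; rw [subst]
        simp [List.isPrefixOf, List.drop]
      have hF : substF (['T','r','u','e'] ++ substT w) = ['T','r','u','e'] ++ substF (substT w) := by
        unfold substF
        exact subst_passthrough ['f','a','l','s','e'] ['F','a','l','s','e'] ['T','r','u','e']
          (substT w) (by decide) (by simp)
      have hN : substN (['T','r','u','e'] ++ substF (substT w)) = ['T','r','u','e'] ++ substN (substF (substT w)) := by
        unfold substN
        exact subst_passthrough ['n','u','l','l'] ['N','o','n','e'] ['T','r','u','e']
          (substF (substT w)) (by decide) (by simp)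
      have hwlen : w.length < (c :: t).length := len_lt_of_append (by decide) hw
      rw [fixScan, if_pos h1]
      rw [hT, hF, hN, ih w.length hwlen w rfl, ← hw]
      simp [List.drop]
    · by_cases h2 : (['f','a','l','s','e'] : List Char).isPrefixOf (c :: t)
      · -- s = "false" ++ w
        obtain ⟨w, hw⟩ := List.isPrefixOf_iff_prefix.mp h2
        have hT : substT (c :: t) = ['f','a','l','s','e'] ++ substT w := by
          rw [← hw]; unfold substT
          exact subst_passthrough ['t','r','u','e'] ['T','r','u','e'] ['f','a','l','s','e']
            w (by decide) (by simp)
        have hF : substF (['f','a','l','s','e'] ++ substT w) = ['F','a','l','s','e'] ++ substF (substT w) := by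
          simp only [List.cons_append, List.nil_append]
          unfold substF; rw [subst]
          simp [List.isPrefixOf, List.drop]
        have hN : substN (['F','a','l','s','e'] ++ substF (substT w)) = ['F','a','l','s','e'] ++ substN (substF (substT w)) := by
          unfold substN
          exact subst_passthrough ['n','u','l','l'] ['N','o','n','e'] ['F','a','l','s','e']
            (substF (substT w)) (by decide) (by simp)
        have hwlen : w.length < (c :: t).length := len_lt_of_append (by decide) hw
        rw [fixScan, if_neg h1, if_pos h2]
        rw [hT, hF, hN, ih w.length hwlen w rfl, ← hw]
        simp [List.drop]
      · by_cases h3 : (['n','u','l','l'] : List Char).isPrefixOf (c :: t)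
        · -- s = "null" ++ w
          obtain ⟨w, hw⟩ := List.isPrefixOf_iff_prefix.mp h3
          have hT : substT (c :: t) = ['n','u','l','l'] ++ substT w := by
            rw [← hw]; unfold substT
            exact subst_passthrough ['t','r','u','e'] ['T','r','u','e'] ['n','u','l','l']
              w (by decide) (by simp)
          have hF : substF (['n','u','l','l'] ++ substT w) = ['n','u','l','l'] ++ substF (substT w) := by
            unfold substF
            exact subst_passthrough ['f','a','l','s','e'] ['F','a','l','s','e'] ['n','u','l','l']
              (substT w) (by decide) (by simp)
          have hN : substN (['n','u','l','l'] ++ substF (substT w)) = ['N','o','n','e'] ++ substN (substF (substT w)) := by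
            simp only [List.cons_append, List.nil_append]
            unfold substN; rw [subst]
            simp [List.isPrefixOf, List.drop]
          have hwlen : w.length < (c :: t).length := len_lt_of_append (by decide) hw
          rw [fixScan, if_neg h1, if_neg h2, if_pos h3]
          rw [hT, hF, hN, ih w.length hwlen w rfl, ← hw]
          simp [List.drop]
        · -- no keyword starts here: every pass keeps c and works on the tail
          have hT : substT (c :: t) = c :: substT t := by
            unfold substT; rw [subst]; simp [h1]
          have hF : substF (c :: substT t) = c :: substF (substT t) := by
            have hnp : ¬ (['f','a','l','s','e'] : List Char).isPrefixOf (c :: substT t) := by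
              intro hp
              simp [List.isPrefixOf] at hp
              obtain ⟨hc, hrest⟩ := hp
              have := prefix_subst_reflect ['t','r','u','e'] ['T','r','u','e'] 'T' rfl
                ['a','l','s','e'] t (by decide)
                (by simpa [← List.isPrefixOf_iff_prefix, List.isPrefixOf] using hrest)
              apply h2
              rw [List.isPrefixOf_iff_prefix, List.cons_prefix_cons]
              exact ⟨hc, this⟩
            unfold substF; rw [subst]; simp [hnp]
          have hN : substN (c :: substF (substT t)) = c :: substN (substF (substT t)) := by
            have hnp : ¬ (['n','u','l','l'] : List Char).isPrefixOf (c :: substF (substT t)) := by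
              intro hp
              simp [List.isPrefixOf] at hp
              obtain ⟨hc, hrest⟩ := hp
              have s1 := prefix_subst_reflect ['f','a','l','s','e'] ['F','a','l','s','e'] 'F' rfl
                ['u','l','l'] (substT t) (by decide)
                (by simpa [← List.isPrefixOf_iff_prefix, List.isPrefixOf] using hrest)
              have s2 := prefix_subst_reflect ['t','r','u','e'] ['T','r','u','e'] 'T' rfl
                ['u','l','l'] t (by decide) s1
              apply h3
              rw [List.isPrefixOf_iff_prefix, List.cons_prefix_cons]
              exact ⟨hc, s2⟩
            unfold substN; rw [subst]; simp [hnp]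
          rw [fixScan, if_neg h1, if_neg h2, if_neg h3]
          rw [hT, hF, hN, ih t.length (by simp) t rfl]

lemma items_fixWord : fixWord_fix_keywords.items
    = [("true", "True"), ("false", "False"), ("null", "None")] := by decide

theorem fix_keywords_eq_alt (txt : String) : fix_keywords txt = fix_keywords_alt txt := by
  unfold fix_keywords fix_keywords_alt
  rw [items_fixWord]
  simp only [List.foldl_cons, List.foldl_nil]
  unfold PySem.Str.replace
  simp only [String.toList_ofList]
  rw [replace_eq_subst _ _ _ (by decide), replace_eq_subst _ _ _ (by decide),
      replace_eq_subst _ _ _ (by decide)]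
  exact congrArg String.ofList (composed_eq_fixScan txt.toList)

-- ===== VERDICT (by name: the statement is the Claim_ definition above) =====
theorem fix_keywords_spec : Claim_equal_fix_keywords := by
  intro txt _
  unfold Spec_fix_keywords
  exact fix_keywords_eq_alt txt
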